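-- pv_equiv track=rewrite | github.com/MatiPl01/Programowanie-Imperatywne | 8. Laboratorium/Zadanie1/debug.py | gen_res
-- ===== SOURCE A (Python) =====
-- def check(S, X):
-- 	'''Check if S can be obtained by summing X in the way described'''
-- 	if S == 0 and X != -1: return False
-- 	if X > S: return False
-- 	while X and S >= 0:
-- 		S -= X
-- 		X //= 10
-- 	if S:
-- 		return False
-- 	return True
--
-- def gen_res(n, m=None):
-- 	''''Prints sums S and X values which correspond to them'''
-- 	low = 0 if n < 100 else int(f'9{"0" * (len(str(n)) - 3)}1')
-- 	result = []
-- 	if m is None: m = n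
-- 	max_len = len(str(m))
-- 	for S in range(n, m + 1):
-- 		for X in range(low, S + 1):
-- 			if check(S, X):
-- 				low = X
-- 				result.append(X)
-- 				break
-- 		else:
-- 			result.append(-1)
-- 	return result
-- ===== SOURCE B (Python) =====
-- def shift_sum(X):
--     t = 0
--     while X:
--         t += X
--         X //= 10
--     return t
--
-- def gen_res(n, m=None):
--     if m is None:
--         m = n
--     if m < n:
--         return []
--     # binary search the smallest X >= 1 whose shift-sum reaches n
--     # (shift_sum is strictly increasing on X >= 0)
--     lo, hi = 1, max(n, 1)
--     while lo < hi:
--         mid = (lo + hi) // 2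
--         if shift_sum(mid) < n:
--             lo = mid + 1
--         else:
--             hi = mid
--     # sweep X upward in step with S: each S is hit by at most one X
--     X, fX = lo, shift_sum(lo)
--     res = []
--     for S in range(n, m + 1):
--         while fX < S:
--             X += 1
--             fX = shift_sum(X)
--         res.append(X if fX == S else -1)
--     return res
-- ===== Notes on version B (the rewrite author's own statement) =====
-- stated objective: alternative
-- what changed: Replaces A's per-S linear scan over candidate X values (seeded by a string-built lower bound and using a subtracting check loop per candidate) with one binary search for the smallest X whose digit-shift-sum reaches n followed by a two-pointer sweep that advances X in step with S, exploiting that the shift-sum is strictly increasing.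
import Mathlib
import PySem

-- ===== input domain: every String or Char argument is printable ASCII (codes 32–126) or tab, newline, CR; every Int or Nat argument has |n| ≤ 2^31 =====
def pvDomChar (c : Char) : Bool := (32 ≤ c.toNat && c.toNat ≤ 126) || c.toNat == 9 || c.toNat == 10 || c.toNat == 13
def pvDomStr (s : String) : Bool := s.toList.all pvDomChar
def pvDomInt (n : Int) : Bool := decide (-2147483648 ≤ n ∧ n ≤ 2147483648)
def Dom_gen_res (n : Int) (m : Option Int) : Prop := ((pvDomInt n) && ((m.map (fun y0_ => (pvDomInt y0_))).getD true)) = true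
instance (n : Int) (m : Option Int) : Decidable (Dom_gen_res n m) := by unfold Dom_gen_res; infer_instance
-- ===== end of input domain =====

-- B replaces A's per-S linear candidate scan (seeded by a string-built lower bound) by one
-- binary search for the first X whose digit-shift-sum reaches n, then a two-pointer sweep
-- advancing X in step with S (the shift-sum is strictly increasing): a different algorithm.

-- ===== PORT A =====

-- the 'while X and S >= 0: S -= X; X //= 10' loop of check; fuel X.toNat+1 bounds the
-- iteration count for the X ≥ 0 values gen_res feeds it (X strictly decreases to 0)
def checkLoop : Nat → Int → Int → Int × Int
  | 0, S, X => (S, X)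
  | fuel + 1, S, X =>
    if X ≠ 0 ∧ 0 ≤ S then checkLoop fuel (S - X) (PySem.Int.floordiv X 10) else (S, X)

def check (S X : Int) : Bool :=
  if S = 0 ∧ X ≠ -1 then false
  else if X > S then false
  else if (checkLoop (X.toNat + 1) S X).1 ≠ 0 then false
  else true

-- 'for X in range(low, S+1): if check(S, X): … break' — first hit of the scan
def findLoop (S : Int) : List Int → Option Int
  | [] => none
  | X :: rest => if check S X then some X else findLoop S rest

-- one iteration of A's outer loop: state (low, result)
def genStep (st : Int × List Int) (S : Int) : Int × List Int :=
  match findLoop S (PySem.List.pyRange st.1 (S + 1) 1) with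
  | some X => (X, st.2 ++ [X])
  | none => (st.1, st.2 ++ [-1])

def gen_res (n : Int) (m : Option Int) : List Int :=
  -- int(f'9{"0" * (len(str(n)) - 3)}1'): the digit string always parses, so ofChars? is
  -- always some and the .getD default is never used
  let low : Int := if n < 100 then 0 else
    (PySem.Int.ofChars? (['9'] ++
      List.replicate ((PySem.Chars.len (PySem.Int.toChars n) - 3).toNat) '0' ++ ['1'])).getD 0
  let mm : Int := match m with | none => n | some v => v
  let _max_len := PySem.Chars.len (PySem.Int.toChars mm)  -- dead in A, kept for faithfulness
  ((PySem.List.pyRange n (mm + 1) 1).foldl genStep (low, ([] : List Int))).2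

-- ===== PORT B =====

-- B's shift_sum: 'while X: t += X; X //= 10'; fuel X.toNat+1 bounds the iterations for the
-- X ≥ 1 values gen_res_alt feeds it (X strictly decreases to 0)
def sumLoop : Nat → Int → Int → Int
  | 0, t, _ => t
  | fuel + 1, t, X =>
    if X ≠ 0 then sumLoop fuel (t + X) (PySem.Int.floordiv X 10) else t

def shift_sum (X : Int) : Int := sumLoop (X.toNat + 1) 0 X

-- B's 'while lo < hi' binary-search loop; the gap hi-lo shrinks every pass, so fuel
-- (hi-lo).toNat+1 bounds the iteration count
def bsLoop : Nat → Int → Int → Int → Int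
  | 0, _, lo, _ => lo
  | fuel + 1, S, lo, hi =>
    if lo < hi then
      let mid := PySem.Int.floordiv (lo + hi) 2
      if shift_sum mid < S then bsLoop fuel S (mid + 1) hi else bsLoop fuel S lo mid
    else lo

-- B's 'while fX < S: X += 1; fX = shift_sum(X)' advance loop; fX grows by at least 1 per
-- pass (shift_sum is strictly increasing), so fuel (S-fX).toNat+1 bounds the iterations
def advLoop : Nat → Int → Int → Int → Int × Int
  | 0, _, X, fX => (X, fX)
  | fuel + 1, S, X, fX =>
    if fX < S then advLoop fuel S (X + 1) (shift_sum (X + 1)) else (X, fX)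

-- one iteration of B's loop over S, threading (X, fX) and appending to res
def genStepAlt (st : (Int × Int) × List Int) (S : Int) : (Int × Int) × List Int :=
  let p := advLoop ((S - st.1.2).toNat + 1) S st.1.1 st.1.2
  (p, st.2 ++ [if p.2 = S then p.1 else -1])

def gen_res_alt (n : Int) (m : Option Int) : List Int :=
  let mm : Int := match m with | none => n | some v => v
  if mm < n then []
  else
    let x0 := bsLoop ((max n 1 - 1).toNat + 1) n 1 (max n 1)
    ((PySem.List.pyRange n (mm + 1) 1).foldl genStepAlt ((x0, shift_sum x0), [])).2

-- ===== PRECONDITION & SPEC =====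
def Spec_gen_res (n : Int) (m : Option Int) (out : List Int) : Prop := out = gen_res_alt n m
instance (n : Int) (m : Option Int) (out : List Int) : Decidable (Spec_gen_res n m out) := by unfold Spec_gen_res; infer_instance

-- ===== CLAIM (what is proved, stated in full; the proofs are below) =====
def Claim_equal_gen_res : Prop := ∀ (n : Int) (m : Option Int), Dom_gen_res n m → Spec_gen_res n m (gen_res n m)

-- ===== LEMMAS AND PROOFS =====

-- floor-division-by-10 bracket, used everywhere below
lemma fd10 (X : Int) : 10 * PySem.Int.floordiv X 10 ≤ X ∧ X < 10 * PySem.Int.floordiv X 10 + 10 := by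
  have h := PySem.Int.floordiv_mul_add_mod X 10
  have h1 := PySem.Int.mod_nonneg X (b := 10) (by norm_num)
  have h2 := PySem.Int.mod_lt X (b := 10) (by norm_num)
  omega

lemma sumLoop_acc : ∀ (fuel : Nat) (t X : Int), sumLoop fuel t X = t + sumLoop fuel 0 X := by
  intro fuel
  induction fuel with
  | zero => intro t X; simp [sumLoop]
  | succ f ih =>
    intro t X
    by_cases hX : X = 0
    · simp [sumLoop, hX]
    · simp only [sumLoop, hX, ne_eq, not_false_eq_true, if_pos]
      rw [ih (t + X), ih (0 + X)]
      ring

lemma sumLoop_fuel : ∀ (f f' : Nat) (X : Int), 0 ≤ X → X.toNat < f → X.toNat < f' →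
    sumLoop f 0 X = sumLoop f' 0 X := by
  intro f
  induction f with
  | zero => intro f' X _ h; omega
  | succ f ih =>
    intro f' X hX hf hf'
    obtain ⟨f'', rfl⟩ : ∃ k, f' = k + 1 := ⟨f' - 1, by omega⟩
    by_cases h0 : X = 0
    · simp [sumLoop, h0]
    · have hXpos : 0 < X := by omega
      have hb := fd10 X
      have hlt : (PySem.Int.floordiv X 10).toNat < X.toNat := by omega
      simp only [sumLoop, h0, ne_eq, not_false_eq_true, if_pos]
      rw [sumLoop_acc f, sumLoop_acc f'',
        ih f'' (PySem.Int.floordiv X 10) (by omega) (by omega) (by omega)]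

lemma shift_sum_pos (X : Int) (hX : 0 < X) :
    shift_sum X = X + shift_sum (PySem.Int.floordiv X 10) := by
  have hb := fd10 X
  have h0 : X ≠ 0 := by omega
  show sumLoop (X.toNat + 1) 0 X = _
  simp only [sumLoop, h0, ne_eq, not_false_eq_true, if_pos]
  rw [sumLoop_acc X.toNat, zero_add,
    sumLoop_fuel X.toNat ((PySem.Int.floordiv X 10).toNat + 1) (PySem.Int.floordiv X 10)
      (by omega) (by omega) (by omega)]
  rfl

lemma le_shift_sum (X : Int) (h : 0 ≤ X) : X ≤ shift_sum X := by
  suffices H : ∀ (k : Nat) (X : Int), 0 ≤ X → X.toNat ≤ k → X ≤ shift_sum X from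
    H X.toNat X h (le_refl _)
  intro k
  induction k with
  | zero =>
    intro X hX hk
    have : X = 0 := by omega
    subst this
    simp [shift_sum, sumLoop]
  | succ k ih =>
    intro X hX hk
    by_cases h0 : X = 0
    · subst h0; simp [shift_sum, sumLoop]
    · have hb := fd10 X
      have h1 := ih (PySem.Int.floordiv X 10) (by omega) (by omega)
      rw [shift_sum_pos X (by omega)]
      omega

lemma shift_sum_lt_succ (X : Int) (h : 0 ≤ X) : shift_sum X < shift_sum (X + 1) := by
  suffices H : ∀ (k : Nat) (X : Int), 0 ≤ X → X.toNat ≤ k → shift_sum X < shift_sum (X + 1) from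
    H X.toNat X h (le_refl _)
  intro k
  induction k with
  | zero =>
    intro X hX hk
    have : X = 0 := by omega
    subst this
    rw [zero_add, shift_sum_pos 1 (by norm_num)]
    have : PySem.Int.floordiv 1 10 = 0 := by have := fd10 1; omega
    rw [this]
    simp [shift_sum, sumLoop]
  | succ k ih =>
    intro X hX hk
    by_cases h0 : X = 0
    · subst h0
      rw [zero_add, shift_sum_pos 1 (by norm_num)]
      have : PySem.Int.floordiv 1 10 = 0 := by have := fd10 1; omega
      rw [this]
      simp [shift_sum, sumLoop]
    · have hXpos : 0 < X := by omega
      have hbX := fd10 X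
      have hbX1 := fd10 (X + 1)
      rw [shift_sum_pos X hXpos, shift_sum_pos (X + 1) (by omega)]
      rcases (by omega :
          PySem.Int.floordiv (X + 1) 10 = PySem.Int.floordiv X 10 ∨
          PySem.Int.floordiv (X + 1) 10 = PySem.Int.floordiv X 10 + 1) with heq | heq
      · rw [heq]; omega
      · rw [heq]
        have := ih (PySem.Int.floordiv X 10) (by omega) (by omega)
        omega

lemma shift_sum_lt (X Y : Int) (h0 : 0 ≤ X) (h : X < Y) : shift_sum X < shift_sum Y := by
  obtain ⟨k, hk⟩ : ∃ k : Nat, Y = X + 1 + (k : Int) := ⟨(Y - X - 1).toNat, by omega⟩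
  subst hk
  clear h
  induction k with
  | zero => simpa using shift_sum_lt_succ X h0
  | succ k ih =>
    have h1 : shift_sum (X + 1 + (k : Int)) < shift_sum (X + 1 + (k : Int) + 1) :=
      shift_sum_lt_succ _ (by omega)
    have h2 : ((k : Int) + 1) = ((k + 1 : Nat) : Int) := by push_cast; ring
    rw [← h2, ← add_assoc]
    omega

lemma shift_sum_le (X Y : Int) (h0 : 0 ≤ X) (h : X ≤ Y) : shift_sum X ≤ shift_sum Y := by
  rcases eq_or_lt_of_le h with rfl | h'
  · exact le_refl _
  · exact le_of_lt (shift_sum_lt X Y h0 h')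

lemma shift_sum_inj (X Y : Int) (hX : 0 ≤ X) (hY : 0 ≤ Y)
    (h : shift_sum X = shift_sum Y) : X = Y := by
  rcases lt_trichotomy X Y with h' | h' | h'
  · exact absurd h (ne_of_lt (shift_sum_lt X Y hX h'))
  · exact h'
  · exact absurd h.symm (ne_of_lt (shift_sum_lt Y X hY h'))

lemma checkLoop_zero_iff : ∀ (f : Nat) (X S : Int), 0 ≤ X → X.toNat < f →
    ((checkLoop f S X).1 = 0 ↔ S = shift_sum X) := by
  intro f
  induction f with
  | zero => intro X S _ h; omega
  | succ f ih =>
    intro X S hX hf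
    by_cases h0 : X = 0
    · subst h0
      simp [checkLoop, shift_sum, sumLoop]
    · have hXpos : 0 < X := by omega
      have hb := fd10 X
      by_cases hS : 0 ≤ S
      · simp only [checkLoop, h0, ne_eq, not_false_eq_true, hS, and_self, if_pos]
        rw [ih (PySem.Int.floordiv X 10) (S - X) (by omega) (by omega),
          shift_sum_pos X hXpos]
        constructor <;> intro h <;> omega
      · simp only [checkLoop, h0, ne_eq, not_false_eq_true, hS, and_false, if_neg,
          not_false_eq_true]
        have h1 : X ≤ shift_sum X := le_shift_sum X hX
        constructor <;> intro h <;> omega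

lemma check_iff (S X : Int) (hX : 0 ≤ X) :
    check S X = true ↔ (1 ≤ X ∧ shift_sum X = S) := by
  have hXne : X ≠ -1 := by omega
  unfold check
  by_cases hS : S = 0
  · simp only [hS, hXne, ne_eq, not_false_eq_true, and_self, if_pos]
    constructor
    · intro h; exact absurd h (by simp)
    · rintro ⟨h1, h2⟩
      have := le_shift_sum X hX
      omega
  · simp only [hS, false_and, if_neg, not_false_eq_true]
    by_cases hgt : X > S
    · simp only [hgt, if_pos]
      constructor
      · intro h; exact absurd h (by simp)
      · rintro ⟨h1, h2⟩
        have := le_shift_sum X hX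
        omega
    · simp only [hgt, if_neg, not_false_eq_true]
      have hiff := checkLoop_zero_iff (X.toNat + 1) X S hX (by omega)
      by_cases hc : (checkLoop (X.toNat + 1) S X).1 = 0
      · have heq : S = shift_sum X := hiff.mp hc
        have hx1 : 1 ≤ X := by
          by_contra hx1
          have hx0 : X = 0 := by omega
          subst hx0
          simp [shift_sum, sumLoop] at heq
          exact hS heq
        rw [if_neg (by simp [hc])]
        simpa using ⟨hx1, heq.symm⟩
      · have hno : ¬(1 ≤ X ∧ shift_sum X = S) := by
          rintro ⟨h1, h2⟩
          exact hc (hiff.mpr h2.symm)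
        simp [hc, hno]

lemma findLoop_eq_none (S : Int) (l : List Int) (h0 : ∀ X ∈ l, 0 ≤ X)
    (hno : ∀ X ∈ l, ¬(1 ≤ X ∧ shift_sum X = S)) : findLoop S l = none := by
  induction l with
  | nil => rfl
  | cons X rest ih =>
    have hX : check S X = false := by
      have := (check_iff S X (h0 X (by simp))).not
      rcases Bool.eq_false_or_eq_true (check S X) with h | h
      · exact absurd ((check_iff S X (h0 X (by simp))).mp h) (hno X (by simp))
      · exact h
    simp only [findLoop, hX, Bool.false_eq_true, if_neg, not_false_eq_true]
    exact ih (fun Y hY => h0 Y (by simp [hY])) (fun Y hY => hno Y (by simp [hY]))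

lemma findLoop_eq_some (S : Int) (l : List Int) (X0 : Int) (h0 : ∀ X ∈ l, 0 ≤ X)
    (hmem : X0 ∈ l) (h1 : 1 ≤ X0) (h2 : shift_sum X0 = S) : findLoop S l = some X0 := by
  induction l with
  | nil => simp at hmem
  | cons X rest ih =>
    by_cases hc : check S X = true
    · have hXX0 : X = X0 := by
        obtain ⟨hx1, hx2⟩ := (check_iff S X (h0 X (by simp))).mp hc
        exact shift_sum_inj X X0 (by omega) (by omega) (by rw [hx2, h2])
      subst hXX0
      simp [findLoop, hc]
    · have hmem' : X0 ∈ rest := by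
        rcases List.mem_cons.mp hmem with rfl | hm
        · exact absurd ((check_iff S X0 (by omega)).mpr ⟨h1, h2⟩) hc
        · exact hm
      simp only [findLoop, hc, Bool.false_eq_true, if_neg, not_false_eq_true]
      exact ih (fun Y hY => h0 Y (by simp [hY])) hmem'

lemma bs_spec : ∀ (fuel : Nat) (S lo hi : Int), 1 ≤ lo → lo ≤ hi → (hi - lo).toNat < fuel →
    S ≤ shift_sum hi → (∀ X, 1 ≤ X → X < lo → shift_sum X < S) →
    (1 ≤ bsLoop fuel S lo hi ∧ bsLoop fuel S lo hi ≤ hi ∧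
     S ≤ shift_sum (bsLoop fuel S lo hi) ∧
     (∀ X, 1 ≤ X → X < bsLoop fuel S lo hi → shift_sum X < S)) := by
  intro fuel
  induction fuel with
  | zero => intro S lo hi _ _ h; omega
  | succ fuel ih =>
    intro S lo hi hlo hlohi hfuel hhi hbelow
    by_cases hlt : lo < hi
    · have hmid := PySem.Int.floordiv_two_mid_bounds (le_of_lt hlt)
      have hmidhi : PySem.Int.floordiv (lo + hi) 2 < hi :=
        (PySem.Int.floordiv_lt_iff_lt_mul (by norm_num)).mpr (by omega)
      set mid := PySem.Int.floordiv (lo + hi) 2 with hmiddef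
      by_cases hcmp : shift_sum mid < S
      · have hstep : bsLoop (fuel + 1) S lo hi = bsLoop fuel S (mid + 1) hi := by
          rw [hmiddef]
          simp only [bsLoop, if_pos hlt]
          rw [if_pos (hmiddef ▸ hcmp)]
        rw [hstep]
        exact ih S (mid + 1) hi (by omega) (by omega) (by omega) hhi
          (fun X hX1 hXmid => by
            have : shift_sum X ≤ shift_sum mid := shift_sum_le X mid (by omega) (by omega)
            omega)
      · have hstep : bsLoop (fuel + 1) S lo hi = bsLoop fuel S lo mid := by
          rw [hmiddef]
          simp only [bsLoop, if_pos hlt]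
          rw [if_neg (hmiddef ▸ hcmp)]
        rw [hstep]
        obtain ⟨g1, g2, g3, g4⟩ := ih S lo mid hlo (by omega) (by omega) (by omega) hbelow
        exact ⟨g1, by omega, g3, g4⟩
    · have hstep : bsLoop (fuel + 1) S lo hi = lo := by
        simp only [bsLoop, if_neg hlt]
      have : lo = hi := by omega
      subst this
      rw [hstep]
      exact ⟨hlo, le_refl _, hhi, hbelow⟩

-- proof-side canonical answer for one S, phrased through B's binary search
def bAns (S : Int) : Int :=
  if S < 1 then (-1 : Int)
  else
    let lo := bsLoop ((S - 1).toNat + 1) S 1 S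
    if shift_sum lo = S then lo else -1

lemma bAns_of_ex (a X0 : Int) (h1 : 1 ≤ X0) (h2 : shift_sum X0 = a) : bAns a = X0 := by
  have hX0a : X0 ≤ a := by
    have := le_shift_sum X0 (by omega)
    omega
  have ha1 : 1 ≤ a := by omega
  obtain ⟨hr1, hrhi, hrS, hrbelow⟩ := bs_spec ((a - 1).toNat + 1) a 1 a (le_refl _) ha1
    (by omega) (le_shift_sum a (by omega)) (fun X hX1 hX2 => by omega)
  set r := bsLoop ((a - 1).toNat + 1) a 1 a with hrdef
  have hX0r : r ≤ X0 := by
    by_contra hc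
    have := hrbelow X0 h1 (by omega)
    omega
  have hreq : shift_sum r = a := by
    have h3 : shift_sum r ≤ shift_sum X0 := shift_sum_le r X0 (by omega) hX0r
    omega
  have hrX0 : r = X0 := shift_sum_inj r X0 (by omega) (by omega) (by rw [hreq, h2])
  unfold bAns
  rw [if_neg (not_lt.mpr ha1)]
  show (if shift_sum r = a then r else -1) = X0
  rw [if_pos hreq]
  exact hrX0

lemma bAns_of_not_ex (a : Int) (h : ∀ X, 1 ≤ X → shift_sum X ≠ a) : bAns a = -1 := by
  by_cases ha : a < 1
  · simp [bAns, ha]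
  · have ha1 : 1 ≤ a := by omega
    obtain ⟨hr1, _, _, _⟩ := bs_spec ((a - 1).toNat + 1) a 1 a (le_refl _) ha1 (by omega)
      (le_shift_sum a (by omega)) (fun X hX1 hX2 => by omega)
    set r := bsLoop ((a - 1).toNat + 1) a 1 a with hrdef
    unfold bAns
    rw [if_neg (not_lt.mpr ha1)]
    show (if shift_sum r = a then r else -1) = -1
    rw [if_neg (h r hr1)]

lemma outerA : ∀ (k : Nat) (a c low : Int) (res : List Int),
    (c - a).toNat = k → 0 ≤ low → (∀ X, 1 ≤ X → a ≤ shift_sum X → low ≤ X) →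
    ((PySem.List.pyRange a c 1).foldl genStep (low, res)).2 =
      res ++ (PySem.List.pyRange a c 1).map bAns := by
  intro k
  induction k with
  | zero =>
    intro a c low res hk _ _
    rw [PySem.List.pyRange_one_eq_nil (by omega)]
    simp
  | succ k ih =>
    intro a c low res hk hlow hinv
    have hac : a < c := by omega
    rw [PySem.List.pyRange_one_cons hac]
    simp only [List.foldl_cons, List.map_cons]
    have hrange0 : ∀ X ∈ PySem.List.pyRange low (a + 1) 1, 0 ≤ X := by
      intro X hX
      have := PySem.List.mem_pyRange_one.mp hX
      omega
    by_cases hex : ∃ X0, 1 ≤ X0 ∧ shift_sum X0 = a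
    · obtain ⟨X0, hX01, hX0s⟩ := hex
      have hX0a : X0 ≤ a := by
        have := le_shift_sum X0 (by omega)
        omega
      have hlowX0 : low ≤ X0 := hinv X0 hX01 (by omega)
      have hfind : findLoop a (PySem.List.pyRange low (a + 1) 1) = some X0 :=
        findLoop_eq_some a _ X0 hrange0
          (PySem.List.mem_pyRange_one.mpr ⟨hlowX0, by omega⟩) hX01 hX0s
      have hstep : genStep (low, res) a = (X0, res ++ [X0]) := by
        simp [genStep, hfind]
      rw [hstep, ih (a + 1) c X0 (res ++ [X0]) (by omega) (by omega)
        (fun X hX1 hXs => by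
          by_contra hc
          have : shift_sum X ≤ shift_sum X0 := shift_sum_le X X0 (by omega) (by omega)
          omega)]
      rw [bAns_of_ex a X0 hX01 hX0s, List.append_assoc]
      rfl
    · push Not at hex
      have hfind : findLoop a (PySem.List.pyRange low (a + 1) 1) = none :=
        findLoop_eq_none a _ hrange0
          (fun X hX => by
            rintro ⟨h1, h2⟩
            exact hex X h1 h2)
      have hstep : genStep (low, res) a = (low, res ++ [-1]) := by
        simp [genStep, hfind]
      rw [hstep, ih (a + 1) c low (res ++ [-1]) (by omega) hlow
        (fun X hX1 hXs => hinv X hX1 (by omega))]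
      rw [bAns_of_not_ex a hex, List.append_assoc]
      rfl

lemma adv_spec : ∀ (fuel : Nat) (S X fX : Int), 1 ≤ X → fX = shift_sum X →
    (S - fX).toNat < fuel →
    (1 ≤ (advLoop fuel S X fX).1 ∧ X ≤ (advLoop fuel S X fX).1 ∧
     (advLoop fuel S X fX).2 = shift_sum (advLoop fuel S X fX).1 ∧
     S ≤ (advLoop fuel S X fX).2 ∧
     (∀ Y, X ≤ Y → Y < (advLoop fuel S X fX).1 → shift_sum Y < S)) := by
  intro fuel
  induction fuel with
  | zero => intro S X fX _ _ h; omega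
  | succ fuel ih =>
    intro S X fX hX hfX hfuel
    by_cases hlt : fX < S
    · have hstep : advLoop (fuel + 1) S X fX = advLoop fuel S (X + 1) (shift_sum (X + 1)) := by
        simp only [advLoop, if_pos hlt]
      have hmono : shift_sum X < shift_sum (X + 1) := shift_sum_lt_succ X (by omega)
      obtain ⟨g1, g2, g3, g4, g5⟩ :=
        ih S (X + 1) (shift_sum (X + 1)) (by omega) rfl (by omega)
      rw [hstep]
      refine ⟨g1, by omega, g3, g4, fun Y hY1 hY2 => ?_⟩
      rcases eq_or_lt_of_le hY1 with rfl | hY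
      · omega
      · exact g5 Y (by omega) hY2
    · have hstep : advLoop (fuel + 1) S X fX = (X, fX) := by
        simp only [advLoop, if_neg hlt]
      rw [hstep]
      exact ⟨hX, le_refl _, hfX, by omega, fun Y hY1 hY2 => by omega⟩

lemma outerB : ∀ (k : Nat) (a c X fX : Int) (res : List Int),
    (c - a).toNat = k → 1 ≤ X → fX = shift_sum X →
    (∀ Y, 1 ≤ Y → Y < X → shift_sum Y < a) →
    ((PySem.List.pyRange a c 1).foldl genStepAlt ((X, fX), res)).2 =
      res ++ (PySem.List.pyRange a c 1).map bAns := by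
  intro k
  induction k with
  | zero =>
    intro a c X fX res hk _ _ _
    rw [PySem.List.pyRange_one_eq_nil (by omega)]
    simp
  | succ k ih =>
    intro a c X fX res hk hX hfX hinv
    have hac : a < c := by omega
    rw [PySem.List.pyRange_one_cons hac]
    simp only [List.foldl_cons, List.map_cons]
    obtain ⟨g1, g2, g3, g4, g5⟩ :=
      adv_spec ((a - fX).toNat + 1) a X fX hX hfX (by omega)
    set p := advLoop ((a - fX).toNat + 1) a X fX with hpdef
    have hall : ∀ Y, 1 ≤ Y → Y < p.1 → shift_sum Y < a := by
      intro Y hY1 hY2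
      by_cases hc : Y < X
      · exact hinv Y hY1 hc
      · exact g5 Y (by omega) hY2
    have hstep : genStepAlt ((X, fX), res) a = (p, res ++ [if p.2 = a then p.1 else -1]) := by
      simp only [genStepAlt, ← hpdef]
    rw [hstep]
    have hval : (if p.2 = a then p.1 else -1) = bAns a := by
      by_cases hex : ∃ X0, 1 ≤ X0 ∧ shift_sum X0 = a
      · obtain ⟨X0, hX01, hX0s⟩ := hex
        have hX0p : p.1 ≤ X0 := by
          by_contra hc
          have := hall X0 hX01 (by omega)
          omega
        have hfp : shift_sum p.1 ≤ shift_sum X0 := shift_sum_le p.1 X0 (by omega) hX0p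
        have hfpa : p.2 = a := by omega
        have : p.1 = X0 := shift_sum_inj p.1 X0 (by omega) (by omega) (by omega)
        rw [if_pos hfpa, bAns_of_ex a X0 hX01 hX0s, this]
      · push Not at hex
        have hne : p.2 ≠ a := by
          rw [g3]
          exact hex p.1 g1
        rw [if_neg hne, bAns_of_not_ex a hex]
    rw [hval, ih (a + 1) c p.1 p.2 (res ++ [bAns a]) (by omega) g1 g3
      (fun Y hY1 hY2 => by have := hall Y hY1 hY2; omega)]
    rw [List.append_assoc]
    rfl

lemma low_inv (c n : Int) (h : shift_sum (c - 1) < n) :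
    ∀ X, 1 ≤ X → n ≤ shift_sum X → c ≤ X := by
  intro X h1 h2
  by_contra hc
  push Not at hc
  have : shift_sum X ≤ shift_sum (c - 1) := shift_sum_le X (c - 1) (by omega) (by omega)
  omega

lemma toDigitsCore_len : ∀ (f n : Nat), n < f →
    (Nat.toDigitsCore 10 f n []).length = Nat.log 10 n + 1 := by
  intro f
  induction f with
  | zero => intro n h; omega
  | succ f ih =>
    intro n hn
    by_cases h0 : n / 10 = 0
    · have hlog : Nat.log 10 n = 0 := by
        rw [Nat.log_eq_zero_iff]
        left
        omega
      simp [Nat.toDigitsCore, h0, hlog]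
    · have h10 : 10 ≤ n := by omega
      have hrec : Nat.toDigitsCore 10 (f + 1) n [] =
          Nat.toDigitsCore 10 f (n / 10) [Nat.digitChar (n % 10)] := by
        simp [Nat.toDigitsCore, h0]
      rw [hrec, Nat.toDigitsCore_lens_eq,
        ih (n / 10) (by omega)]
      have hlog := Nat.log_div_base 10 n
      have hpos := Nat.log_pos (b := 10) (by norm_num) h10
      omega

lemma toChars_len_of (e : Nat) (n : Int) (h1 : (10 : Int) ^ e ≤ n) (h2 : n < 10 ^ (e + 1)) :
    (PySem.Int.toChars n).length = e + 1 := by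
  have hn0 : 0 < n := lt_of_lt_of_le (by positivity) h1
  have hnn : ¬ n < 0 := by omega
  unfold PySem.Int.toChars
  rw [if_neg hnn]
  unfold Nat.toDigits
  rw [toDigitsCore_len (n.toNat + 1) n.toNat (by omega)]
  have hle : 10 ^ e ≤ n.toNat := by
    have : ((10 : Nat) ^ e : Int) = (10 : Int) ^ e := by push_cast; ring
    omega
  have hlt : n.toNat < 10 ^ (e + 1) := by
    have : ((10 : Nat) ^ (e + 1) : Int) = (10 : Int) ^ (e + 1) := by push_cast; ring
    omega
  rw [Nat.log_eq_of_pow_le_of_lt_pow hle hlt]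

-- ===== VERDICT (by name: the statement is the Claim_ definition above) =====
-- assembling both programs' outer loops once the seed invariants are established
lemma assemble (n mm low0 : Int)
    (hmain : 0 ≤ low0 ∧ ∀ X, 1 ≤ X → n ≤ shift_sum X → low0 ≤ X) :
    ((PySem.List.pyRange n (mm + 1) 1).foldl genStep (low0, [])).2 =
      (let x0 := bsLoop ((max n 1 - 1).toNat + 1) n 1 (max n 1)
       ((PySem.List.pyRange n (mm + 1) 1).foldl genStepAlt ((x0, shift_sum x0), [])).2) := by
  have hhi : n ≤ shift_sum (max n 1) := by
    by_cases hn1 : n ≤ 1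
    · have : max n 1 = 1 := by omega
      rw [this]
      have : shift_sum 1 = 1 := by decide
      omega
    · have : max n 1 = n := by omega
      rw [this]
      exact le_shift_sum n (by omega)
  obtain ⟨hx1, _, _, hxbelow⟩ := bs_spec ((max n 1 - 1).toNat + 1) n 1 (max n 1)
    (le_refl _) (by omega) (by omega) hhi (fun X h1 h2 => by omega)
  rw [outerA ((mm + 1) - n).toNat n (mm + 1) low0 [] rfl hmain.1 hmain.2]
  show _ = ((PySem.List.pyRange n (mm + 1) 1).foldl genStepAlt
    ((bsLoop ((max n 1 - 1).toNat + 1) n 1 (max n 1),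
      shift_sum (bsLoop ((max n 1 - 1).toNat + 1) n 1 (max n 1))), [])).2
  rw [outerB ((mm + 1) - n).toNat n (mm + 1) _ _ [] rfl hx1 rfl hxbelow]

-- packaging of one branch of the low-seed analysis
lemma low_case (n low0 c : Int) (hval : low0 = c) (h1 : 1 ≤ c) (hss : shift_sum (c - 1) < n) :
    0 ≤ low0 ∧ ∀ X, 1 ≤ X → n ≤ shift_sum X → low0 ≤ X :=
  ⟨by omega, by rw [hval]; exact low_inv c n hss⟩

theorem gen_res_spec : Claim_equal_gen_res := by
  intro n m hdom
  unfold Spec_gen_res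
  have hdom' := hdom
  simp only [Dom_gen_res, Bool.and_eq_true] at hdom'
  have hpv := hdom'.1
  have hbound : n ≤ 2147483648 := by
    simp only [pvDomInt, decide_eq_true_eq] at hpv
    exact hpv.2
  simp only [gen_res, gen_res_alt]
  set low0 : Int := (if n < 100 then 0 else
    (PySem.Int.ofChars? (['9'] ++
      List.replicate ((PySem.Chars.len (PySem.Int.toChars n) - 3).toNat) '0' ++ ['1'])).getD 0)
    with hlowdef
  have hmain : 0 ≤ low0 ∧ ∀ X, 1 ≤ X → n ≤ shift_sum X → low0 ≤ X := by
    by_cases hn : n < 100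
    · refine ⟨by rw [hlowdef, if_pos hn], fun X h1 _ => ?_⟩
      rw [hlowdef, if_pos hn]
      omega
    · -- n ≥ 100: the seed is 9·10^(d-2)+1 for d = len(str(n)); its predecessor has
      -- shift-sum 10^(d-1) - 1 < n
      have hn100 : (100 : Int) ≤ n := by omega
      have hN : n.toNat ≠ 0 := by omega
      obtain ⟨e, he2, he9, hl, hu⟩ :
          ∃ e : Nat, 2 ≤ e ∧ e ≤ 9 ∧ 10 ^ e ≤ n.toNat ∧ n.toNat < 10 ^ (e + 1) := by
        refine ⟨Nat.log 10 n.toNat, ?_, ?_, Nat.pow_log_le_self 10 hN,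
          Nat.lt_pow_succ_log_self (by norm_num) n.toNat⟩
        · exact (Nat.le_log_iff_pow_le (by norm_num) hN).mpr (by omega)
        · by_contra hc
          have h10 : (10 : Nat) ≤ Nat.log 10 n.toNat := by omega
          have := (Nat.le_log_iff_pow_le (b := 10) (y := n.toNat) (by norm_num) hN).mp h10
          omega
      have hlen : (PySem.Int.toChars n).length = e + 1 := by
        refine toChars_len_of e n ?_ ?_
        · have : ((10 ^ e : Nat) : Int) ≤ ((n.toNat : Nat) : Int) := by exact_mod_cast hl
          push_cast at this
          omega
        · have : ((n.toNat : Nat) : Int) < ((10 ^ (e + 1) : Nat) : Int) := by exact_mod_cast hu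
          push_cast at this
          omega
      have hge : (10 : Int) ^ e ≤ n := by
        have : ((10 ^ e : Nat) : Int) ≤ ((n.toNat : Nat) : Int) := by exact_mod_cast hl
        push_cast at this
        omega
      interval_cases e
      · exact low_case n low0 91
          (by rw [hlowdef, if_neg hn]; simp only [PySem.Chars.len, hlen]; decide)
          (by norm_num)
          (by have hd : shift_sum (91 - 1 : Int) = 99 := by decide
              norm_num at hge
              omega)
      · exact low_case n low0 901
          (by rw [hlowdef, if_neg hn]; simp only [PySem.Chars.len, hlen]; decide)
          (by norm_num)
          (by have hd : shift_sum (901 - 1 : Int) = 999 := by decide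
              norm_num at hge
              omega)
      · exact low_case n low0 9001
          (by rw [hlowdef, if_neg hn]; simp only [PySem.Chars.len, hlen]; decide)
          (by norm_num)
          (by have hd : shift_sum (9001 - 1 : Int) = 9999 := by decide
              norm_num at hge
              omega)
      · exact low_case n low0 90001
          (by rw [hlowdef, if_neg hn]; simp only [PySem.Chars.len, hlen]; decide)
          (by norm_num)
          (by have hd : shift_sum (90001 - 1 : Int) = 99999 := by decide
              norm_num at hge
              omega)
      · exact low_case n low0 900001
          (by rw [hlowdef, if_neg hn]; simp only [PySem.Chars.len, hlen]; decide)
          (by norm_num)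
          (by have hd : shift_sum (900001 - 1 : Int) = 999999 := by decide
              norm_num at hge
              omega)
      · exact low_case n low0 9000001
          (by rw [hlowdef, if_neg hn]; simp only [PySem.Chars.len, hlen]; decide)
          (by norm_num)
          (by have hd : shift_sum (9000001 - 1 : Int) = 9999999 := by decide
              norm_num at hge
              omega)
      · exact low_case n low0 90000001
          (by rw [hlowdef, if_neg hn]; simp only [PySem.Chars.len, hlen]; decide)
          (by norm_num)
          (by have hd : shift_sum (90000001 - 1 : Int) = 99999999 := by decide
              norm_num at hge
              omega)
      · exact low_case n low0 900000001
          (by rw [hlowdef, if_neg hn]; simp only [PySem.Chars.len, hlen]; decide)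
          (by norm_num)
          (by have hd : shift_sum (900000001 - 1 : Int) = 999999999 := by decide
              norm_num at hge
              omega)
  cases m with
  | none =>
    dsimp only
    rw [if_neg (by omega : ¬ n < n)]
    exact assemble n n low0 hmain
  | some v =>
    dsimp only
    by_cases hmn : v < n
    · rw [if_pos hmn, PySem.List.pyRange_one_eq_nil (by omega)]
      simp
    · rw [if_neg hmn]
      exact assemble n v low0 hmain
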